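-- pv_equiv track=rewrite | github.com/Frosmin/CodeForces | E_Pattern_Matching.py | edgess
-- ===== SOURCE A (Python) =====
-- def edgess(N,edges):
--     M=len(edges)
--     start=[0]*(N+1)
--     elist=[0]*M
--     for e in edges:
--         start[e[0]+1]+=1
--     for i in range(1,N+1):
--         start[i]+=start[i-1]
--     counter=start[:]
--     for e in edges:
--         elist[counter[e[0]]]=e[1]
--         counter[e[0]]+=1
--     visited=[]
--     low=[0]*N
--     Ord=[-1]*N
--     ids=[0]*N
--     NG=[0,0]
--     def dfs(v):
--         stack=[(v,-1,0),(v,-1,1)]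
--         while stack:
--             v,bef,t=stack.pop()
--             if t:
--                 if bef!=-1 and Ord[v]!=-1:
--                     low[bef]=min(low[bef],Ord[v])
--                     stack.pop()
--                     continue
--                 low[v]=NG[0]
--                 Ord[v]=NG[0]
--                 NG[0]+=1
--                 visited.append(v)
--                 for i in range(start[v],start[v+1]):
--                     to=elist[i]
--                     if Ord[to]==-1:
--                         stack.append((to,v,0))
--                         stack.append((to,v,1))
--                     else:
--                         low[v]=min(low[v],Ord[to])
--             else:
--                 if low[v]==Ord[v]:
--                     while(True):
--                         u=visited.pop()
--                         Ord[u]=N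
--                         ids[u]=NG[1]
--                         if u==v:
--                             break
--                     NG[1]+=1
--                 low[bef]=min(low[bef],low[v])
--     for i in range(N):
--         if Ord[i]==-1:
--             dfs(i)
--     for i in range(N):
--         ids[i]=NG[1]-1-ids[i]
--     group_num=NG[1]
--     counts=[0]*group_num
--     for x in ids:
--         counts[x]+=1
--     groups=[[] for i in range(group_num)]
--     for i in range(N):
--         groups[ids[i]].append(i)
--     return groups
-- ===== SOURCE B (Python) =====
-- def edgess(N, edges):
--     # Recursive Tarjan SCC (true recursion instead of A's explicit tagged stack);
--     # children are explored in the order A's stack pops them (reverse adjacency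
--     # order) so the topological numbering of components is identical; the dead
--     # `counts` pass of A is dropped.
--     M = len(edges)
--     start = [0] * (N + 1)
--     elist = [0] * M
--     for e in edges:
--         start[e[0] + 1] += 1
--     for i in range(1, N + 1):
--         start[i] += start[i - 1]
--     counter = start[:]
--     for e in edges:
--         elist[counter[e[0]]] = e[1]
--         counter[e[0]] += 1
--     visited = []
--     low = [0] * N
--     Ord = [-1] * N
--     ids = [0] * N
--     state = [0, 0]  # preorder counter, component counter
--     def dfs(v):
--         low[v] = Ord[v] = state[0]
--         state[0] += 1
--         visited.append(v)
--         pending = []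
--         for i in range(start[v], start[v + 1]):
--             to = elist[i]
--             if Ord[to] == -1:
--                 pending.append(to)
--             else:
--                 low[v] = min(low[v], Ord[to])
--         for to in reversed(pending):
--             if Ord[to] == -1:
--                 dfs(to)
--                 low[v] = min(low[v], low[to])
--             else:
--                 low[v] = min(low[v], Ord[to])
--         if low[v] == Ord[v]:
--             while True:
--                 u = visited.pop()
--                 Ord[u] = N
--                 ids[u] = state[1]
--                 if u == v:
--                     break
--             state[1] += 1
--     for i in range(N):
--         if Ord[i] == -1:
--             dfs(i)
--     comp = state[1]
--     for i in range(N):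
--         ids[i] = comp - 1 - ids[i]
--     groups = [[] for _ in range(comp)]
--     for i in range(N):
--         groups[ids[i]].append(i)
--     return groups
-- ===== Notes on version B (the rewrite author's own statement) =====
-- stated objective: alternative
-- what changed: A simulates the DFS with one explicit stack of tagged (vertex,parent,phase) entry pairs popped and re-checked in a while loop; B is the textbook recursive Tarjan helper (a real recursive dfs(v) whose caller folds the child's lowlink back in), visiting children in the order A's stack pops them, with A's dead `counts` pass dropped.
-- outside the precondition, e.g. on edgess(2, [[-2, 0]]): A returns [[1], [0]], B returns [[1], [0]]; on edgess(2, [[5, 0]]): A raises IndexError, B raises IndexError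
import Mathlib
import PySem

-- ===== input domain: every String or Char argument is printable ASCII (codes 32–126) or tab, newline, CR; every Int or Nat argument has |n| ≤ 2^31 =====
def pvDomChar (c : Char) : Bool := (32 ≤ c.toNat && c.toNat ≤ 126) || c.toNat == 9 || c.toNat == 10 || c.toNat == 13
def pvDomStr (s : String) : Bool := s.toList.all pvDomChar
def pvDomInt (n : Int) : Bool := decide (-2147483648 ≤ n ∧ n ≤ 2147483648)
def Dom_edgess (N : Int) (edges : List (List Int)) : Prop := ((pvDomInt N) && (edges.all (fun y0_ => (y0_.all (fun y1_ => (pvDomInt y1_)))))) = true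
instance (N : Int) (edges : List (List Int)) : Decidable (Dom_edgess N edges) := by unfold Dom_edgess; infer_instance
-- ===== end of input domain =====

-- B replaces A's explicit stack of tagged (vertex,parent,phase) entry pairs by the
-- textbook RECURSIVE Tarjan helper (children explored in the order A's stack pops
-- them), and drops A's dead `counts` pass; objective: alternative decomposition.

-- Python list indexing l[i] (possibly negative) done by hand: exact for -len(l) ≤ i < len(l),
-- which covers every access the admitted inputs (Pre_) reach.
def pvIdx (n : Nat) (i : Int) : Nat := (if i < 0 then i + (n : Int) else i).toNat
def aget (xs : List Int) (i : Int) : Int := xs.getD (pvIdx xs.length i) 0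
def aset (xs : List Int) (i : Int) (x : Int) : List Int := xs.set (pvIdx xs.length i) x
def lgetL (xss : List (List Int)) (i : Int) : List Int := xss.getD (pvIdx xss.length i) []
def lsetL (xss : List (List Int)) (i : Int) (x : List Int) : List (List Int) := xss.set (pvIdx xss.length i) x

-- mutable locals of both Pythons: low, Ord, ids, visited, and the two counters
structure PvSt where
  low : List Int
  ord : List Int
  ids : List Int
  visited : List Int
  ng0 : Int
  ng1 : Int
deriving Repr, DecidableEq

-- ===== PORT A =====
-- CSR adjacency build (`start`, `elist`); this code is verbatim identical in A and B,
-- so both ports share these helpers.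
def pvStart (N : Int) (edges : List (List Int)) : List Int :=
  let s1 := edges.foldl (fun s e => aset s (aget e 0 + 1) (aget s (aget e 0 + 1) + 1))
    (List.replicate (N + 1).toNat 0)
  (PySem.List.pyRange 1 (N + 1)).foldl (fun s i => aset s i (aget s i + aget s (i - 1))) s1

def pvElist (edges : List (List Int)) (start : List Int) : List Int :=
  (edges.foldl (fun (p : List Int × List Int) e =>
      (aset p.1 (aget p.2 (aget e 0)) (aget e 1),
       aset p.2 (aget e 0) (aget p.2 (aget e 0) + 1)))
    (List.replicate edges.length 0, start)).1

def pvInit (N : Int) : PvSt :=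
  ⟨List.replicate N.toNat 0, List.replicate N.toNat (-1), List.replicate N.toNat 0, [], 0, 0⟩

-- the `while True: u=visited.pop(); …` component pop, shared verbatim by A and B
-- (on empty visited Python would raise; that state is unreachable in any actual run)
def pvPop (N v : Int) (vis : List Int) (ord ids : List Int) (ng1 : Int) :
    List Int × List Int × List Int :=
  match vis with
  | [] => ([], ord, ids)
  | u :: vs =>
    let ord' := aset ord u N
    let ids' := aset ids u ng1
    if u = v then (vs, ord', ids') else pvPop N v vs ord' ids' ng1

def pvComp (N v : Int) (st : PvSt) : PvSt :=
  if aget st.low v = aget st.ord v then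
    { st with visited := (pvPop N v st.visited st.ord st.ids st.ng1).1, ord := (pvPop N v st.visited st.ord st.ids st.ng1).2.1, ids := (pvPop N v st.visited st.ord st.ids st.ng1).2.2, ng1 := st.ng1 + 1 }
  else st

-- A's neighbour scan at a just-activated v: push a (tgt,v,0)/(tgt,v,1) entry pair for
-- each unvisited target, min Ord[tgt] into low[v] for the visited ones.
def pvScanA (v : Int) (elist : List Int) (q : PvSt × List (Int × Int × Int)) (i : Int) :
    PvSt × List (Int × Int × Int) :=
  let tgt := aget elist i
  if aget q.1.ord tgt = -1 then (q.1, (tgt, v, 1) :: (tgt, v, 0) :: q.2)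
  else ({ q.1 with low := aset q.1.low v (min (aget q.1.low v) (aget q.1.ord tgt)) }, q.2)

-- one iteration of A's `while stack:` body (stack head = Python's stack top)
def pvStepA (N : Int) (start elist : List Int) :
    List (Int × Int × Int) × PvSt → List (Int × Int × Int) × PvSt
  | ([], st) => ([], st)
  | ((v, bef, t) :: rest, st) =>
    if t ≠ 0 then
      if bef ≠ -1 ∧ aget st.ord v ≠ -1 then
        (rest.drop 1, { st with low := aset st.low bef (min (aget st.low bef) (aget st.ord v)) })
      else
        let st1 : PvSt := { st with low := aset st.low v st.ng0, ord := aset st.ord v st.ng0, ng0 := st.ng0 + 1, visited := v :: st.visited }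
        let q := (PySem.List.pyRange (aget start v) (aget start (v + 1))).foldl
          (pvScanA v elist) (st1, rest)
        (q.2, q.1)
    else
      let st1 := pvComp N v st
      (rest, { st1 with low := aset st1.low bef (min (aget st1.low bef) (aget st1.low v)) })

-- fuel for the bounded iteration of A's `while`: the run processes each vertex at most
-- twice plus its adjacency scans, so this computable bound is never reached in a real run
def pvRangeLen (start : List Int) (j : Nat) : Nat :=
  (aget start ((j : Int) + 1) - aget start (j : Int)).toNat
def pvTotScan (N : Int) (start : List Int) : Nat :=
  ((List.range N.toNat).map (pvRangeLen start)).sum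
def pvFuelA (N : Int) (start : List Int) : Nat := 2 * N.toNat + pvTotScan N start + 2

def pvDfsA (N : Int) (start elist : List Int) (v : Int) (st : PvSt) : PvSt :=
  ((pvStepA N start elist)^[pvFuelA N start] ([(v, -1, 1), (v, -1, 0)], st)).2

-- `for i in range(N): ids[i]=NG[1]-1-ids[i]` — verbatim identical in A and B, shared
def pvRevIds (N ng1 : Int) (ids0 : List Int) : List Int :=
  (PySem.List.pyRange 0 N).foldl (fun ids i => aset ids i (ng1 - 1 - aget ids i)) ids0

-- group building — verbatim identical in A and B, shared
def pvGroups (N ng1 : Int) (ids : List Int) : List (List Int) :=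
  (PySem.List.pyRange 0 N).foldl
    (fun g i => lsetL g (aget ids i) (lgetL g (aget ids i) ++ [i]))
    (List.replicate ng1.toNat [])

def edgess (N : Int) (edges : List (List Int)) : List (List Int) :=
  let start := pvStart N edges
  let elist := pvElist edges start
  let st := (PySem.List.pyRange 0 N).foldl
    (fun st i => if aget st.ord i = -1 then pvDfsA N start elist i st else st) (pvInit N)
  let ids := pvRevIds N st.ng1 st.ids
  let _counts := ids.foldl (fun c x => aset c x (aget c x + 1)) (List.replicate st.ng1.toNat 0)
  pvGroups N st.ng1 ids

-- ===== PORT B =====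
-- B's forward scan at a just-activated v: min Ord into low[v] for visited targets,
-- collect the unvisited ones into `pending` (Python's first for-loop in dfs)
def pvScanB (v : Int) (elist : List Int) (q : PvSt × List Int) (i : Int) : PvSt × List Int :=
  let tgt := aget elist i
  if aget q.1.ord tgt = -1 then (q.1, q.2 ++ [tgt])
  else ({ q.1 with low := aset q.1.low v (min (aget q.1.low v) (aget q.1.ord tgt)) }, q.2)

-- the recursive `def dfs(v):` of B, one fuel unit per nested call (the fuel is a
-- termination guard only; the bound is never reached on a real run)
def pvDfsB (N : Int) (start elist : List Int) : Nat → Int → PvSt → PvSt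
  | 0, _, st => st
  | fuel + 1, v, st =>
    let st1 : PvSt := { st with low := aset st.low v st.ng0, ord := aset st.ord v st.ng0, ng0 := st.ng0 + 1, visited := v :: st.visited }
    let q := (PySem.List.pyRange (aget start v) (aget start (v + 1))).foldl
      (pvScanB v elist) (st1, [])
    let st2 := q.2.reverse.foldl (fun s tgt =>
      if aget s.ord tgt = -1 then
        let s' := pvDfsB N start elist fuel tgt s
        { s' with low := aset s'.low v (min (aget s'.low v) (aget s'.low tgt)) }
      else { s with low := aset s.low v (min (aget s.low v) (aget s.ord tgt)) }) q.1
    pvComp N v st2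

def edgess_alt (N : Int) (edges : List (List Int)) : List (List Int) :=
  let start := pvStart N edges
  let elist := pvElist edges start
  let st := (PySem.List.pyRange 0 N).foldl
    (fun st i => if aget st.ord i = -1 then pvDfsB N start elist (pvFuelA N start) i st else st)
    (pvInit N)
  pvGroups N st.ng1 (pvRevIds N st.ng1 st.ids)

-- ===== PRECONDITION & SPEC =====
-- Pre_ admits exactly the well-formed graphs: N ≥ 0 (or no edges at all) and every edge row
-- has at least two entries with both endpoints in [0,N).  Outside it A almost always raises
-- IndexError; on the rare out-of-range endpoints where A still returns, the value is an
-- accident of Python's negative-index wraparound (see claim cites).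
def Pre_edgess (N : Int) (edges : List (List Int)) : Prop :=
  (0 ≤ N ∨ edges = []) ∧
  ∀ e ∈ edges, 2 ≤ e.length ∧ 0 ≤ aget e 0 ∧ aget e 0 < N ∧ 0 ≤ aget e 1 ∧ aget e 1 < N

instance (N : Int) (edges : List (List Int)) : Decidable (Pre_edgess N edges) := by
  unfold Pre_edgess; infer_instance

def pvWitness_edgess : Int × List (List Int) := (4, [[0, 1], [1, 2], [2, 0], [1, 3], [3, 3]])

def Spec_edgess (N : Int) (edges : List (List Int)) (out : List (List Int)) : Prop :=
  out = edgess_alt N edges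
instance (N : Int) (edges : List (List Int)) (out : List (List Int)) :
    Decidable (Spec_edgess N edges out) := by unfold Spec_edgess; infer_instance

-- ===== CLAIM (what is proved, stated in full; the proofs are below) =====
def Claim_equal_edgess : Prop :=
  ∀ (N : Int) (edges : List (List Int)), Dom_edgess N edges → Pre_edgess N edges →
    Spec_edgess N edges (edgess N edges)

-- ===== LEMMAS AND PROOFS =====

-- ---------- basic array-slot lemmas ----------
theorem pv_len_aset (xs : List Int) (i x : Int) : (aset xs i x).length = xs.length := by
  simp [aset]

theorem pv_getD_set (l : List Int) (s j : Nat) (x : Int) :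
    (l.set s x).getD j 0 = if s = j ∧ j < l.length then x else l.getD j 0 := by
  by_cases h1 : s = j
  · subst h1
    by_cases h2 : s < l.length
    · simp [List.getD, h2]
    · rw [List.set_eq_of_length_le (by omega)]
      simp [h2]
  · simp [List.getD, List.getElem?_set_ne h1, h1]

theorem pv_aget_aset (xs : List Int) (i j x : Int) :
    aget (aset xs i x) j =
      if pvIdx xs.length i = pvIdx xs.length j ∧ pvIdx xs.length j < xs.length then x
      else aget xs j := by
  simp only [aget, aset, List.length_set]
  exact pv_getD_set xs (pvIdx xs.length i) (pvIdx xs.length j) x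

theorem pv_set_preserve (lA lB : List Int) (hlen : lA.length = lB.length) (s : Nat) (x : Int)
    (j : Nat) (h : lA.getD j 0 = lB.getD j 0) :
    (lA.set s x).getD j 0 = (lB.set s x).getD j 0 := by
  rw [pv_getD_set, pv_getD_set, hlen, h]

theorem pvIdx_nonneg (n : Nat) (i : Int) (h : 0 ≤ i) : pvIdx n i = i.toNat := by
  unfold pvIdx
  rw [if_neg (by omega)]

theorem pv_aget_toNat (xs : List Int) (i : Int) (h : 0 ≤ i) :
    aget xs i = xs.getD i.toNat 0 := by
  unfold aget
  rw [pvIdx_nonneg _ _ h]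

theorem pv_aget_natCast (xs : List Int) (j : Nat) : aget xs (j : Int) = xs.getD j 0 := by
  rw [pv_aget_toNat xs _ (by omega)]
  simp

theorem pvIdx_of_range {N x : Int} (h0 : 0 ≤ x) (h1 : x < N) :
    pvIdx N.toNat x = x.toNat ∧ x.toNat < N.toNat := by
  unfold pvIdx
  constructor
  · simp [not_lt.mpr h0]
  · omega

theorem pv_getD_replicate (n j : Nat) (a : Int) :
    (List.replicate n a).getD j 0 = if j < n then a else 0 := by
  by_cases h : j < n <;> simp [List.getD, h]

theorem pv_aget_aset_self {N : Int} (xs : List Int) (i x : Int) (hlen : xs.length = N.toNat)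
    (h0 : 0 ≤ i) (h1 : i < N) : aget (aset xs i x) i = x := by
  obtain ⟨hidx, hlt⟩ := pvIdx_of_range h0 h1
  rw [pv_aget_aset, if_pos ⟨rfl, by rw [hlen, hidx]; exact hlt⟩]

theorem pv_aset_toNat {N : Int} (xs : List Int) (i x : Int) (hlen : xs.length = N.toNat)
    (h0 : 0 ≤ i) (h1 : i < N) : aset xs i x = xs.set i.toNat x := by
  obtain ⟨hidx, hlt⟩ := pvIdx_of_range h0 h1
  rw [aset, hlen, hidx]

theorem pvIdx_neg_one {N : Int} (hN : 0 < N) : pvIdx N.toNat (-1) = N.toNat - 1 := by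
  unfold pvIdx
  rw [if_pos (by norm_num)]
  omega

-- ---------- the stack-shape encoding: a pending list as A's entry pairs ----------
def encPairs (v : Int) (p : List Int) : Nat → List (Int × Int × Int)
  | 0 => []
  | Nat.succ k => (p.getD k 0, v, 1) :: (p.getD k 0, v, 0) :: encPairs v p k

def encPairsL (v : Int) (p : List Int) : List (Int × Int × Int) := encPairs v p p.length

theorem encPairs_append (v x : Int) (p : List Int) :
    ∀ k, k ≤ p.length → encPairs v (p ++ [x]) k = encPairs v p k := by
  intro k
  induction k with
  | zero => intro _; rfl
  | succ k ih =>
    intro hk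
    simp only [encPairs]
    rw [ih (by omega), List.getD_append _ _ _ _ (by omega)]

theorem encPairsL_snoc (v x : Int) (p : List Int) :
    encPairsL v (p ++ [x]) = (x, v, 1) :: (x, v, 0) :: encPairsL v p := by
  unfold encPairsL
  rw [List.length_append]
  show encPairs v (p ++ [x]) (p.length + 1) = _
  simp only [encPairs]
  rw [encPairs_append v x p p.length (le_refl _),
      List.getD_append_right _ _ _ _ (le_refl _)]
  simp

-- ---------- the two neighbour scans run in lockstep ----------
def pvScanRel (v : Int) (sA sB tA tB : PvSt) : Prop :=
  tA.ord = sA.ord ∧ tA.ids = sA.ids ∧ tA.visited = sA.visited ∧ tA.ng0 = sA.ng0 ∧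
  tA.ng1 = sA.ng1 ∧ tB.ord = sB.ord ∧ tB.ids = sB.ids ∧ tB.visited = sB.visited ∧
  tB.ng0 = sB.ng0 ∧ tB.ng1 = sB.ng1 ∧ tA.low.length = sA.low.length ∧
  tB.low.length = sB.low.length ∧ aget tA.low v = aget tB.low v ∧
  (∀ j : Nat, sA.low.getD j 0 = sB.low.getD j 0 → tA.low.getD j 0 = tB.low.getD j 0)

theorem pv_scan_sim (N v : Int) (elist : List Int)
    (helist : ∀ j : Nat, 0 ≤ elist.getD j 0 ∧ elist.getD j 0 < N) :
    ∀ (S : List Int) (sA sB : PvSt) (p0 : List Int) (stk0 : List (Int × Int × Int)),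
      sA.ord = sB.ord → sA.low.length = sB.low.length → aget sA.low v = aget sB.low v →
      (S.foldl (pvScanA v elist) (sA, encPairsL v p0 ++ stk0)).2
          = encPairsL v (S.foldl (pvScanB v elist) (sB, p0)).2 ++ stk0 ∧
      pvScanRel v sA sB (S.foldl (pvScanA v elist) (sA, encPairsL v p0 ++ stk0)).1
        (S.foldl (pvScanB v elist) (sB, p0)).1 ∧
      (∃ pnew, (S.foldl (pvScanB v elist) (sB, p0)).2 = p0 ++ pnew ∧
        ∀ x ∈ pnew, 0 ≤ x ∧ x < N) := by
  intro S
  induction S with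
  | nil =>
    intro sA sB p0 stk0 hord hlen hv
    exact ⟨rfl, ⟨rfl, rfl, rfl, rfl, rfl, rfl, rfl, rfl, rfl, rfl, rfl, rfl, hv,
      fun j hj => hj⟩, ⟨[], by simp, by simp⟩⟩
  | cons i S ih =>
    intro sA sB p0 stk0 hord hlen hv
    simp only [List.foldl_cons, pvScanA, pvScanB]
    have hcc : aget sA.ord (aget elist i) = aget sB.ord (aget elist i) := by rw [hord]
    by_cases hc : aget sB.ord (aget elist i) = -1
    · rw [hcc, if_pos hc, if_pos hc]
      have hstep : (aget elist i, v, 1) :: (aget elist i, v, 0) :: (encPairsL v p0 ++ stk0)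
          = encPairsL v (p0 ++ [aget elist i]) ++ stk0 := by
        rw [encPairsL_snoc]; rfl
      rw [hstep]
      obtain ⟨h1, h2, pnew, hp, hr⟩ := ih sA sB (p0 ++ [aget elist i]) stk0 hord hlen hv
      refine ⟨h1, h2, aget elist i :: pnew, by rw [hp, List.append_assoc]; rfl, ?_⟩
      intro x hx
      rcases List.mem_cons.mp hx with hx | hx
      · subst hx; exact helist (pvIdx elist.length i)
      · exact hr x hx
    · rw [hcc, if_neg hc, if_neg hc]
      set m := min (aget sB.low v) (aget sB.ord (aget elist i)) with hm
      have hmA : min (aget sA.low v) (aget sB.ord (aget elist i)) = m := by rw [hm, hv]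
      rw [hmA]
      set sA' : PvSt := { sA with low := aset sA.low v m } with hsA'
      set sB' : PvSt := { sB with low := aset sB.low v m } with hsB'
      have hord' : sA'.ord = sB'.ord := hord
      have hlen' : sA'.low.length = sB'.low.length := by
        show (aset sA.low v m).length = (aset sB.low v m).length
        rw [pv_len_aset, pv_len_aset, hlen]
      have hv' : aget sA'.low v = aget sB'.low v := by
        show aget (aset sA.low v m) v = aget (aset sB.low v m) v
        rw [pv_aget_aset, pv_aget_aset, hlen, hv]
      obtain ⟨h1, h2, pnew, hp, hr⟩ := ih sA' sB' p0 stk0 hord' hlen' hv'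
      obtain ⟨r1, r2, r3, r4, r5, r6, r7, r8, r9, r10, r11, r12, r13, r14⟩ := h2
      refine ⟨h1, ⟨r1, r2, r3, r4, r5, r6, r7, r8, r9, r10,
        by rw [r11]; exact pv_len_aset sA.low v m,
        by rw [r12]; exact pv_len_aset sB.low v m, r13, ?_⟩, pnew, hp, hr⟩
      intro j hj
      refine r14 j ?_
      show (aset sA.low v m).getD j 0 = (aset sB.low v m).getD j 0
      rw [aset, aset, hlen]
      exact pv_set_preserve sA.low sB.low hlen _ m j hj

theorem pvScanB_len (v : Int) (elist : List Int) :
    ∀ (S : List Int) (q : PvSt × List Int),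
      ((S.foldl (pvScanB v elist) q).2).length ≤ q.2.length + S.length := by
  intro S
  induction S with
  | nil => intro q; simp
  | cons i S ih =>
    intro q
    simp only [List.foldl_cons]
    have hstep : ((pvScanB v elist q i).2).length ≤ q.2.length + 1 := by
      by_cases hc : aget q.1.ord (aget elist i) = -1 <;> simp [pvScanB, hc]
    calc ((S.foldl (pvScanB v elist) (pvScanB v elist q i)).2).length
        ≤ ((pvScanB v elist q i).2).length + S.length := ih _
      _ ≤ q.2.length + (S.length + 1) := by omega
      _ = q.2.length + (i :: S).length := by simp

-- ---------- component pop ----------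
theorem pvPop_ord (N v : Int) :
    ∀ (vis ord ids : List Int) (ng1 : Int) (u : Int),
      aget (pvPop N v vis ord ids ng1).2.1 u = aget ord u ∨
      aget (pvPop N v vis ord ids ng1).2.1 u = N := by
  intro vis
  induction vis with
  | nil => intro ord ids ng1 u; exact Or.inl rfl
  | cons w vs ih =>
    intro ord ids ng1 u
    simp only [pvPop]
    split
    · by_cases hc : pvIdx ord.length w = pvIdx ord.length u ∧ pvIdx ord.length u < ord.length
      · right; rw [pv_aget_aset, if_pos hc]
      · left; rw [pv_aget_aset, if_neg hc]
    · rcases ih (aset ord w N) (aset ids w ng1) ng1 u with hh | hh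
      · rw [hh]
        by_cases hc : pvIdx ord.length w = pvIdx ord.length u ∧ pvIdx ord.length u < ord.length
        · right; rw [pv_aget_aset, if_pos hc]
        · left; rw [pv_aget_aset, if_neg hc]
      · right; exact hh

theorem pvPop_ord_len (N v : Int) :
    ∀ (vis ord ids : List Int) (ng1 : Int),
      (pvPop N v vis ord ids ng1).2.1.length = ord.length := by
  intro vis
  induction vis with
  | nil => intro ord ids ng1; rfl
  | cons w vs ih =>
    intro ord ids ng1
    simp only [pvPop]
    split
    · exact pv_len_aset ord w N
    · rw [ih (aset ord w N) (aset ids w ng1) ng1, pv_len_aset]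

-- ---------- step equations for A's machine ----------
theorem pvStepA_one (N : Int) (start elist : List Int) (v b : Int)
    (rest : List (Int × Int × Int)) (st : PvSt) :
    pvStepA N start elist ((v, b, 1) :: rest, st) =
      if b ≠ -1 ∧ aget st.ord v ≠ -1 then
        (rest.drop 1, { st with low := aset st.low b (min (aget st.low b) (aget st.ord v)) })
      else
        (((PySem.List.pyRange (aget start v) (aget start (v + 1))).foldl (pvScanA v elist)
            ({ st with low := aset st.low v st.ng0, ord := aset st.ord v st.ng0, ng0 := st.ng0 + 1, visited := v :: st.visited }, rest)).2,
         ((PySem.List.pyRange (aget start v) (aget start (v + 1))).foldl (pvScanA v elist)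
            ({ st with low := aset st.low v st.ng0, ord := aset st.ord v st.ng0, ng0 := st.ng0 + 1, visited := v :: st.visited }, rest)).1) := by
  simp only [pvStepA]
  rw [if_pos (by norm_num : (1 : Int) ≠ 0)]

theorem pvStepA_zero (N : Int) (start elist : List Int) (v b : Int)
    (rest : List (Int × Int × Int)) (st : PvSt) :
    pvStepA N start elist ((v, b, 0) :: rest, st) =
      (rest, { pvComp N v st with low := aset (pvComp N v st).low b (min (aget (pvComp N v st).low b) (aget (pvComp N v st).low v)) }) := by
  simp only [pvStepA]
  rw [if_neg (by norm_num : ¬ (0 : Int) ≠ 0)]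

theorem pvStepA_nil (N : Int) (start elist : List Int) (st : PvSt) :
    pvStepA N start elist ([], st) = ([], st) := rfl

theorem pv_iter_nil (N : Int) (start elist : List Int) :
    ∀ (m : Nat) (st : PvSt), (pvStepA N start elist)^[m] ([], st) = ([], st) := by
  intro m
  induction m with
  | zero => intro st; rfl
  | succ m ih =>
    intro st
    rw [Function.iterate_succ_apply, pvStepA_nil]
    exact ih st

theorem pvComp_low (N v : Int) (st : PvSt) : (pvComp N v st).low = st.low := by
  unfold pvComp; split <;> rfl

theorem pvComp_ng0 (N v : Int) (st : PvSt) : (pvComp N v st).ng0 = st.ng0 := by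
  unfold pvComp; split <;> rfl

theorem pvComp_ord_cases (N v : Int) (st : PvSt) (u : Int) :
    aget (pvComp N v st).ord u = aget st.ord u ∨ aget (pvComp N v st).ord u = N := by
  unfold pvComp
  split
  · exact pvPop_ord N v st.visited st.ord st.ids st.ng1 u
  · exact Or.inl rfl

theorem pvComp_ord_len (N v : Int) (st : PvSt) :
    (pvComp N v st).ord.length = st.ord.length := by
  unfold pvComp
  split
  · exact pvPop_ord_len N v st.visited st.ord st.ids st.ng1
  · rfl

theorem pvComp_pair (N v : Int) (s t : PvSt) (hvis : s.visited = t.visited)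
    (hord : s.ord = t.ord) (hids : s.ids = t.ids) (hng1 : s.ng1 = t.ng1)
    (hlv : aget s.low v = aget t.low v) :
    (pvComp N v s).visited = (pvComp N v t).visited ∧
    (pvComp N v s).ord = (pvComp N v t).ord ∧
    (pvComp N v s).ids = (pvComp N v t).ids ∧
    (pvComp N v s).ng1 = (pvComp N v t).ng1 := by
  unfold pvComp
  by_cases hc : aget t.low v = aget t.ord v
  · rw [if_pos (by rw [hlv, hord]; exact hc), if_pos hc]
    exact ⟨by simp [hvis, hord, hids, hng1], by simp [hvis, hord, hids, hng1],
      by simp [hvis, hord, hids, hng1], by simp [hng1]⟩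
  · rw [if_neg (by rw [hlv, hord]; exact hc), if_neg hc]
    exact ⟨hvis, hord, hids, hng1⟩

-- ---------- ord monotonicity and the potential Φ ----------
def pvOrdMono (N : Int) (o o' : List Int) : Prop :=
  ∀ j : Nat, j < N.toNat → o.getD j 0 ≠ -1 → o'.getD j 0 ≠ -1

theorem pvOrdMono_refl (N : Int) (o : List Int) : pvOrdMono N o o := fun _ _ h => h

theorem pvOrdMono_trans {N : Int} {o1 o2 o3 : List Int}
    (h1 : pvOrdMono N o1 o2) (h2 : pvOrdMono N o2 o3) : pvOrdMono N o1 o3 :=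
  fun j hj h => h2 j hj (h1 j hj h)

theorem pvComp_mono (N v : Int) (hN : 0 < N) (st : PvSt) :
    pvOrdMono N st.ord (pvComp N v st).ord := by
  intro j hj hne
  have hcase := pvComp_ord_cases N v st (j : Int)
  rw [pv_aget_natCast, pv_aget_natCast] at hcase
  rcases hcase with he | he
  · rw [he]; exact hne
  · rw [he]; omega

theorem pv_aset_mono_ord (N : Int) (o : List Int) (v x : Int) (hx : x ≠ -1) :
    pvOrdMono N o (aset o v x) := by
  intro j hj hne
  have h := pv_aget_aset o v (j : Int) x
  rw [pv_aget_natCast, pv_aget_natCast] at h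
  rw [h]
  split
  · exact hx
  · exact hne

theorem pv_fsum_mono (f : Nat → Nat) (p q : Nat → Bool) :
    ∀ (l : List Nat), (∀ a ∈ l, q a = true → p a = true) →
      ((l.filter q).map f).sum ≤ ((l.filter p).map f).sum := by
  intro l
  induction l with
  | nil => intro _; simp
  | cons a l ih =>
    intro h
    have ih' := ih (fun b hb hqb => h b (List.mem_cons_of_mem _ hb) hqb)
    simp only [List.filter_cons]
    by_cases hq : q a = true
    · rw [if_pos hq, if_pos (h a (List.mem_cons_self ..) hq)]
      simp only [List.map_cons, List.sum_cons]
      omega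
    · rw [if_neg hq]
      by_cases hp : p a = true
      · rw [if_pos hp]
        simp only [List.map_cons, List.sum_cons]
        omega
      · rw [if_neg hp]
        exact ih'

theorem pv_fsum_mem (f : Nat → Nat) (q : Nat → Bool) (j0 : Nat) :
    ∀ (l : List Nat), j0 ∈ l → q j0 = true → f j0 ≤ ((l.filter q).map f).sum := by
  intro l
  induction l with
  | nil => intro h; exact absurd h (List.not_mem_nil)
  | cons a l ih =>
    intro hmem hq
    simp only [List.filter_cons]
    rcases List.mem_cons.mp hmem with he | hmem'
    · subst he
      rw [if_pos hq]
      simp only [List.map_cons, List.sum_cons]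
      omega
    · by_cases hqa : q a = true
      · rw [if_pos hqa]
        simp only [List.map_cons, List.sum_cons]
        have := ih hmem' hq
        omega
      · rw [if_neg hqa]
        exact ih hmem' hq

theorem pv_fsum_drop (f : Nat → Nat) (p q : Nat → Bool) (j0 : Nat)
    (hp : p j0 = true) (hq : q j0 = false) :
    ∀ (l : List Nat), l.Nodup → j0 ∈ l → (∀ a ∈ l, q a = true → p a = true) →
      ((l.filter q).map f).sum + f j0 ≤ ((l.filter p).map f).sum := by
  intro l
  induction l with
  | nil => intro _ h; exact absurd h (List.not_mem_nil)
  | cons a l ih =>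
    intro hnd hmem h
    obtain ⟨ha, hl⟩ := List.nodup_cons.mp hnd
    simp only [List.filter_cons]
    by_cases he : a = j0
    · subst he
      rw [if_neg (by simp [hq]), if_pos hp]
      simp only [List.map_cons, List.sum_cons]
      have := pv_fsum_mono f p q l (fun b hb hqb => h b (List.mem_cons_of_mem _ hb) hqb)
      omega
    · have hmem' : j0 ∈ l := by
        rcases List.mem_cons.mp hmem with hh | hh
        · exact absurd hh.symm he
        · exact hh
      have ih' := ih hl hmem' (fun b hb hqb => h b (List.mem_cons_of_mem _ hb) hqb)
      by_cases hqa : q a = true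
      · rw [if_pos hqa, if_pos (h a (List.mem_cons_self ..) hqa)]
        simp only [List.map_cons, List.sum_cons]
        omega
      · rw [if_neg hqa]
        by_cases hpa : p a = true
        · rw [if_pos hpa]
          simp only [List.map_cons, List.sum_cons]
          omega
        · rw [if_neg hpa]
          exact ih'

def pvPhi (N : Int) (start ord : List Int) : Nat :=
  (((List.range N.toNat).filter (fun j => ord.getD j 0 = -1)).map
    (fun j => 2 + pvRangeLen start j)).sum

theorem pvPhi_mono (N : Int) (start o o' : List Int) (h : pvOrdMono N o o') :
    pvPhi N start o' ≤ pvPhi N start o := by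
  unfold pvPhi
  refine pv_fsum_mono _ _ _ (List.range N.toNat) ?_
  intro a ha hq
  simp only [decide_eq_true_eq] at hq ⊢
  by_contra hne
  exact (h a (List.mem_range.mp ha) hne) hq

theorem pvPhi_drop (N : Int) (start o o' : List Int) (j0 : Nat) (hj0 : j0 < N.toNat)
    (h1 : o.getD j0 0 = -1) (h2 : o'.getD j0 0 ≠ -1)
    (h3 : ∀ j : Nat, j ≠ j0 → o'.getD j 0 = o.getD j 0) :
    pvPhi N start o' + (2 + pvRangeLen start j0) ≤ pvPhi N start o := by
  unfold pvPhi
  refine pv_fsum_drop _ _ _ j0 (by simp only [decide_eq_true_eq]; exact h1)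
    (by simp only [decide_eq_false_iff_not]; exact h2) (List.range N.toNat)
    (List.nodup_range) (List.mem_range.mpr hj0) ?_
  intro a _ hq
  simp only [decide_eq_true_eq] at hq ⊢
  by_cases he : a = j0
  · subst he; exact absurd hq h2
  · rw [← h3 a he]; exact hq

theorem pvPhi_pos (N : Int) (start o : List Int) (j0 : Nat) (hj0 : j0 < N.toNat)
    (h1 : o.getD j0 0 = -1) : 2 ≤ pvPhi N start o := by
  unfold pvPhi
  exact le_trans (Nat.le_add_right 2 (pvRangeLen start j0))
    (pv_fsum_mem (fun j => 2 + pvRangeLen start j) (fun j => o.getD j 0 = -1) j0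
      (List.range N.toNat) (List.mem_range.mpr hj0)
      (by simp only [decide_eq_true_eq]; exact h1))

theorem pv_sum_map_two_add (g : Nat → Nat) :
    ∀ (l : List Nat), (l.map (fun j => 2 + g j)).sum = 2 * l.length + (l.map g).sum := by
  intro l
  induction l with
  | nil => simp
  | cons a l ih =>
    simp only [List.map_cons, List.sum_cons, List.length_cons, ih]
    omega

theorem pvPhi_le (N : Int) (start o : List Int) : pvPhi N start o ≤ pvFuelA N start := by
  unfold pvPhi pvFuelA pvTotScan
  have h1 := pv_fsum_mono (fun j => 2 + pvRangeLen start j) (fun _ => true)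
    (fun j => o.getD j 0 = -1) (List.range N.toNat) (fun _ _ _ => rfl)
  rw [List.filter_true] at h1
  have h2 := pv_sum_map_two_add (pvRangeLen start) (List.range N.toNat)
  rw [List.length_range] at h2
  omega

-- ---------- the coupled invariant between A's machine state and B's recursion state ----------
-- act = the chain of currently active (recursing) vertices, innermost first; the two
-- low arrays may differ only in slot N-1 (A's root post-step writes low[-1], which
-- Python wraps to low[N-1]) and only while no active vertex is N-1.
structure PvInv (N : Int) (act : List Int) (sA sB : PvSt) : Prop where
  ord_eq : sA.ord = sB.ord
  ids_eq : sA.ids = sB.ids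
  vis_eq : sA.visited = sB.visited
  ng0_eq : sA.ng0 = sB.ng0
  ng1_eq : sA.ng1 = sB.ng1
  lenA : sA.low.length = N.toNat
  lenB : sB.low.length = N.toNat
  ord_len : sB.ord.length = N.toNat
  syncLow : ∀ j : Nat, j < N.toNat →
    sA.low.getD j 0 = sB.low.getD j 0 ∨ (j + 1 = N.toNat ∧ ∀ u ∈ act, u.toNat ≠ j)
  act_range : ∀ u ∈ act, 0 ≤ u ∧ u < N
  act_ord : ∀ u ∈ act, aget sB.ord u ≠ -1
  ng0_nonneg : 0 ≤ sB.ng0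

theorem pv_sync_mem (N : Int) {act : List Int} {sA sB : PvSt} (h : PvInv N act sA sB)
    {u : Int} (hu : u ∈ act) : aget sA.low u = aget sB.low u := by
  obtain ⟨h0, h1⟩ := h.act_range u hu
  obtain ⟨hidx, hlt⟩ := pvIdx_of_range h0 h1
  rcases h.syncLow u.toNat hlt with heq | ⟨-, hall⟩
  · simp only [aget, h.lenA, h.lenB, hidx]
    exact heq
  · exact absurd rfl (hall u hu)

theorem pvInv_weaken (N : Int) (v : Int) {act : List Int} {sA sB : PvSt}
    (h : PvInv N (v :: act) sA sB) : PvInv N act sA sB := by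
  refine ⟨h.ord_eq, h.ids_eq, h.vis_eq, h.ng0_eq, h.ng1_eq, h.lenA, h.lenB, h.ord_len,
    ?_, fun u hu => h.act_range u (List.mem_cons_of_mem _ hu),
    fun u hu => h.act_ord u (List.mem_cons_of_mem _ hu), h.ng0_nonneg⟩
  intro j hj
  rcases h.syncLow j hj with heq | ⟨hj1, hall⟩
  · exact Or.inl heq
  · exact Or.inr ⟨hj1, fun u hu => hall u (List.mem_cons_of_mem _ hu)⟩

theorem pvInv_set_low (N : Int) {act : List Int} {sA sB : PvSt} (h : PvInv N act sA sB)
    (w : Int) (_hw : w ∈ act) (mv : Int) :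
    PvInv N act { sA with low := aset sA.low w mv } { sB with low := aset sB.low w mv } := by
  have hlen : sA.low.length = sB.low.length := by rw [h.lenA, h.lenB]
  refine ⟨h.ord_eq, h.ids_eq, h.vis_eq, h.ng0_eq, h.ng1_eq, ?_, ?_, h.ord_len, ?_,
    h.act_range, h.act_ord, h.ng0_nonneg⟩
  · show (aset sA.low w mv).length = N.toNat
    rw [pv_len_aset]; exact h.lenA
  · show (aset sB.low w mv).length = N.toNat
    rw [pv_len_aset]; exact h.lenB
  · intro j hj
    rcases h.syncLow j hj with heq | hr
    · left
      show (aset sA.low w mv).getD j 0 = (aset sB.low w mv).getD j 0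
      rw [aset, aset, hlen]
      exact pv_set_preserve sA.low sB.low hlen _ mv j heq
    · exact Or.inr hr

theorem pvInv_comp (N v : Int) (hN : 0 < N) {act : List Int} {sA sB : PvSt}
    (h : PvInv N act sA sB) (hv : v ∈ act) :
    PvInv N act (pvComp N v sA) (pvComp N v sB) := by
  have hlv := pv_sync_mem N h hv
  obtain ⟨e1, e2, e3, e4⟩ := pvComp_pair N v sA sB h.vis_eq h.ord_eq h.ids_eq h.ng1_eq hlv
  refine ⟨e2, e3, e1, ?_, e4, ?_, ?_, ?_, ?_, h.act_range, ?_, ?_⟩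
  · rw [pvComp_ng0, pvComp_ng0]; exact h.ng0_eq
  · rw [pvComp_low]; exact h.lenA
  · rw [pvComp_low]; exact h.lenB
  · rw [pvComp_ord_len]; exact h.ord_len
  · intro j hj
    simp only [pvComp_low]
    exact h.syncLow j hj
  · intro u hu
    rcases pvComp_ord_cases N v sB u with he | he
    · rw [he]; exact h.act_ord u hu
    · rw [he]; omega
  · rw [pvComp_ng0]; exact h.ng0_nonneg

theorem pvInv_rootwrite (N : Int) (hN : 0 < N) {sA sB : PvSt} (h : PvInv N [] sA sB)
    (mv : Int) : PvInv N [] { sA with low := aset sA.low (-1) mv } sB := by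
  refine ⟨h.ord_eq, h.ids_eq, h.vis_eq, h.ng0_eq, h.ng1_eq, ?_, h.lenB, h.ord_len, ?_,
    h.act_range, h.act_ord, h.ng0_nonneg⟩
  · show (aset sA.low (-1) mv).length = N.toNat
    rw [pv_len_aset]; exact h.lenA
  · intro j hj
    by_cases hj1 : j = N.toNat - 1
    · exact Or.inr ⟨by omega, by simp⟩
    · show (aset sA.low (-1) mv).getD j 0 = sB.low.getD j 0 ∨ _
      rw [aset, h.lenA, pvIdx_neg_one hN, pv_getD_set, if_neg (fun hh => hj1 hh.1.symm)]
      rcases h.syncLow j hj with heq | ⟨hj2, -⟩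
      · exact Or.inl heq
      · omega

-- ---------- B's loop body, A's post-step image, and the simulation statement ----------
def pvBodyB (N : Int) (start elist : List Int) (fuel : Nat) (v : Int) : PvSt → Int → PvSt :=
  fun s tgt =>
    if aget s.ord tgt = -1 then
      let s' := pvDfsB N start elist fuel tgt s
      { s' with low := aset s'.low v (min (aget s'.low v) (aget s'.low tgt)) }
    else { s with low := aset s.low v (min (aget s.low v) (aget s.ord tgt)) }

-- the caller-side `low[v]=min(low[v],low[to])` of B after a child call (no-op at the root)
def pvPost (_N bef v : Int) (s : PvSt) : PvSt :=
  if bef = -1 then s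
  else { s with low := aset s.low bef (min (aget s.low bef) (aget s.low v)) }

theorem pvPost_ord (N bef v : Int) (s : PvSt) : (pvPost N bef v s).ord = s.ord := by
  unfold pvPost; split <;> rfl

theorem pvBodyB_unvis (N : Int) (start elist : List Int) (fuel : Nat) (v : Int)
    (s : PvSt) (tgt : Int) (hc : aget s.ord tgt = -1) (hv : ¬ v = -1) :
    pvBodyB N start elist fuel v s tgt = pvPost N v tgt (pvDfsB N start elist fuel tgt s) := by
  unfold pvBodyB pvPost
  rw [if_pos hc, if_neg hv]

theorem pvBodyB_vis (N : Int) (start elist : List Int) (fuel : Nat) (v : Int)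
    (s : PvSt) (tgt : Int) (hc : ¬ aget s.ord tgt = -1) :
    pvBodyB N start elist fuel v s tgt
      = { s with low := aset s.low v (min (aget s.low v) (aget s.ord tgt)) } := by
  unfold pvBodyB
  rw [if_neg hc]

theorem pvDfsB_succ (N : Int) (start elist : List Int) (fuel : Nat) (v : Int) (st : PvSt) :
    pvDfsB N start elist (fuel + 1) v st =
      pvComp N v
        ((((PySem.List.pyRange (aget start v) (aget start (v + 1))).foldl (pvScanB v elist)
            ({ st with low := aset st.low v st.ng0, ord := aset st.ord v st.ng0, ng0 := st.ng0 + 1, visited := v :: st.visited }, [])).2).reverse.foldl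
          (pvBodyB N start elist fuel v)
          (((PySem.List.pyRange (aget start v) (aget start (v + 1))).foldl (pvScanB v elist)
            ({ st with low := aset st.low v st.ng0, ord := aset st.ord v st.ng0, ng0 := st.ng0 + 1, visited := v :: st.visited }, [])).1)) := rfl

-- what one simulated call asserts: running A's machine through the (v,bef,·) entry pair
-- lands back on the continuation K with a state related to B's recursive dfs result
def PvSIMP (N : Int) (start elist : List Int) (fuel : Nat) : Prop :=
  ∀ (v bef : Int) (act : List Int) (K : List (Int × Int × Int)) (sA sB : PvSt),
    PvInv N act sA sB → 0 ≤ v → v < N → aget sB.ord v = -1 →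
    ((bef = -1 ∧ act = []) ∨ ∃ rest, act = bef :: rest) →
    pvPhi N start sB.ord ≤ fuel →
    ∃ n sA2,
      (pvStepA N start elist)^[n] ((v, bef, 1) :: (v, bef, 0) :: K, sA) = (K, sA2) ∧
      PvInv N act sA2 (pvPost N bef v (pvDfsB N start elist fuel v sB)) ∧
      n + pvPhi N start (pvDfsB N start elist fuel v sB).ord ≤ pvPhi N start sB.ord ∧
      pvOrdMono N sB.ord (pvDfsB N start elist fuel v sB).ord ∧
      aget (pvDfsB N start elist fuel v sB).ord v ≠ -1

-- ---------- activation (numbering + scan) preserves the invariant ----------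
theorem pv_act_inv (N : Int) (start elist : List Int)
    (helist : ∀ j : Nat, 0 ≤ elist.getD j 0 ∧ elist.getD j 0 < N)
    (v : Int) (act : List Int) (K0 : List (Int × Int × Int)) (sA sB : PvSt)
    (h : PvInv N act sA sB) (hv0 : 0 ≤ v) (hvN : v < N) (hord : aget sB.ord v = -1) :
    ∃ (pend : List Int) (tA tB : PvSt),
      ((PySem.List.pyRange (aget start v) (aget start (v + 1))).foldl (pvScanA v elist)
        ({ sA with low := aset sA.low v sA.ng0, ord := aset sA.ord v sA.ng0, ng0 := sA.ng0 + 1, visited := v :: sA.visited }, K0))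
        = (tA, encPairsL v pend ++ K0) ∧
      ((PySem.List.pyRange (aget start v) (aget start (v + 1))).foldl (pvScanB v elist)
        ({ sB with low := aset sB.low v sB.ng0, ord := aset sB.ord v sB.ng0, ng0 := sB.ng0 + 1, visited := v :: sB.visited }, []))
        = (tB, pend) ∧
      PvInv N (v :: act) tA tB ∧
      (∀ x ∈ pend, 0 ≤ x ∧ x < N) ∧
      tB.ord = aset sB.ord v sB.ng0 ∧
      pend.length ≤ pvRangeLen start v.toNat := by
  have hordA : aget sA.ord v = -1 := by rw [h.ord_eq]; exact hord
  set S := PySem.List.pyRange (aget start v) (aget start (v + 1)) with hS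
  set st1A : PvSt := { sA with low := aset sA.low v sA.ng0, ord := aset sA.ord v sA.ng0, ng0 := sA.ng0 + 1, visited := v :: sA.visited } with hA1
  set st1B : PvSt := { sB with low := aset sB.low v sB.ng0, ord := aset sB.ord v sB.ng0, ng0 := sB.ng0 + 1, visited := v :: sB.visited } with hB1
  have hscan := pv_scan_sim N v elist helist S st1A st1B [] K0
      (by show aset sA.ord v sA.ng0 = aset sB.ord v sB.ng0; rw [h.ord_eq, h.ng0_eq])
      (by show (aset sA.low v sA.ng0).length = (aset sB.low v sB.ng0).length
          rw [pv_len_aset, pv_len_aset, h.lenA, h.lenB])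
      (by show aget (aset sA.low v sA.ng0) v = aget (aset sB.low v sB.ng0) v
          rw [pv_aget_aset_self sA.low v sA.ng0 h.lenA hv0 hvN,
              pv_aget_aset_self sB.low v sB.ng0 h.lenB hv0 hvN, h.ng0_eq])
  have hnilL : encPairsL v ([] : List Int) ++ K0 = K0 := rfl
  rw [hnilL] at hscan
  obtain ⟨hstk, hrel, pnew, hp, hr⟩ := hscan
  obtain ⟨r1, r2, r3, r4, r5, r6, r7, r8, r9, r10, r11, r12, r13, r14⟩ := hrel
  have hsetA : st1A.low = sA.low.set v.toNat sA.ng0 := pv_aset_toNat sA.low v sA.ng0 h.lenA hv0 hvN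
  have hsetB : st1B.low = sB.low.set v.toNat sB.ng0 := pv_aset_toNat sB.low v sB.ng0 h.lenB hv0 hvN
  have hvtoNat : v.toNat < N.toNat := (pvIdx_of_range hv0 hvN).2
  refine ⟨(S.foldl (pvScanB v elist) (st1B, [])).2,
    (S.foldl (pvScanA v elist) (st1A, K0)).1,
    (S.foldl (pvScanB v elist) (st1B, [])).1, by rw [← hstk], rfl, ?_, ?_, r6, ?_⟩
  · refine ⟨?_, ?_, ?_, ?_, ?_, ?_, ?_, ?_, ?_, ?_, ?_, ?_⟩
    · rw [r1, r6]
      show aset sA.ord v sA.ng0 = aset sB.ord v sB.ng0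
      rw [h.ord_eq, h.ng0_eq]
    · rw [r2, r7]; exact h.ids_eq
    · rw [r3, r8]
      show v :: sA.visited = v :: sB.visited
      rw [h.vis_eq]
    · rw [r4, r9]
      show sA.ng0 + 1 = sB.ng0 + 1
      rw [h.ng0_eq]
    · rw [r5, r10]; exact h.ng1_eq
    · rw [r11]
      show (aset sA.low v sA.ng0).length = N.toNat
      rw [pv_len_aset]; exact h.lenA
    · rw [r12]
      show (aset sB.low v sB.ng0).length = N.toNat
      rw [pv_len_aset]; exact h.lenB
    · rw [r6]
      show (aset sB.ord v sB.ng0).length = N.toNat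
      rw [pv_len_aset]; exact h.ord_len
    · intro j hj
      have hbase : st1A.low.getD j 0 = st1B.low.getD j 0 ∨
          (j + 1 = N.toNat ∧ v.toNat ≠ j ∧ ∀ u ∈ act, u.toNat ≠ j) := by
        by_cases hvj : v.toNat = j
        · left
          rw [hsetA, hsetB, ← hvj, pv_getD_set, pv_getD_set,
              if_pos ⟨rfl, by rw [h.lenA]; exact hvtoNat⟩,
              if_pos ⟨rfl, by rw [h.lenB]; exact hvtoNat⟩, h.ng0_eq]
        · rcases h.syncLow j hj with heq | ⟨hj1, hall⟩
          · left
            rw [hsetA, hsetB, pv_getD_set, pv_getD_set,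
                if_neg (fun hh => hvj hh.1), if_neg (fun hh => hvj hh.1)]
            exact heq
          · exact Or.inr ⟨hj1, hvj, hall⟩
      rcases hbase with heq | ⟨hj1, hvj, hall⟩
      · exact Or.inl (r14 j heq)
      · refine Or.inr ⟨hj1, ?_⟩
        intro u hu
        rcases List.mem_cons.mp hu with hu | hu
        · rw [hu]; exact hvj
        · exact hall u hu
    · intro u hu
      rcases List.mem_cons.mp hu with hu | hu
      · rw [hu]; exact ⟨hv0, hvN⟩
      · exact h.act_range u hu
    · rw [r6]
      intro u hu
      rcases List.mem_cons.mp hu with hu | hu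
      · rw [hu]
        rw [pv_aget_aset_self sB.ord v sB.ng0 h.ord_len hv0 hvN]
        have := h.ng0_nonneg; omega
      · rw [pv_aget_aset]
        split
        · have := h.ng0_nonneg; omega
        · exact h.act_ord u hu
    · rw [r9]
      show 0 ≤ sB.ng0 + 1
      have := h.ng0_nonneg; omega
  · intro x hx
    rw [hp] at hx
    exact hr x (by simpa using hx)
  · have h1 := pvScanB_len v elist S (st1B, [])
    have h2 : S.length = pvRangeLen start v.toNat := by
      rw [hS, PySem.List.length_pyRange_one]
      unfold pvRangeLen
      rw [Int.toNat_of_nonneg hv0]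
    simp only [List.length_nil, Nat.zero_add] at h1
    omega

-- ---------- the reversed pending loop runs in lockstep with A popping the pairs ----------
theorem pvLOOP (N : Int) (start elist : List Int) (F : Nat)
    (hIH : PvSIMP N start elist F)
    (v : Int) (act : List Int) (hv0 : 0 ≤ v) (_hvN : v < N) :
    ∀ (p : List Int) (K : List (Int × Int × Int)) (sA sB : PvSt),
      PvInv N (v :: act) sA sB → (∀ x ∈ p, 0 ≤ x ∧ x < N) →
      pvPhi N start sB.ord ≤ F →
      ∃ n sA2,
        (pvStepA N start elist)^[n] (encPairsL v p ++ K, sA) = (K, sA2) ∧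
        PvInv N (v :: act) sA2 (p.reverse.foldl (pvBodyB N start elist F v) sB) ∧
        n + pvPhi N start (p.reverse.foldl (pvBodyB N start elist F v) sB).ord
          ≤ p.length + pvPhi N start sB.ord ∧
        pvOrdMono N sB.ord (p.reverse.foldl (pvBodyB N start elist F v) sB).ord := by
  intro p
  induction p using List.reverseRecOn with
  | nil =>
    intro K sA sB h hp hphi
    exact ⟨0, sA, by simp [encPairsL, encPairs], h, by simp, pvOrdMono_refl N sB.ord⟩
  | append_singleton q x ih =>
    intro K sA sB h hp hphi
    have hx := hp x (by simp)
    have hvne : ¬ v = -1 := by omega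
    have hBfold : (q ++ [x]).reverse.foldl (pvBodyB N start elist F v) sB
        = q.reverse.foldl (pvBodyB N start elist F v) (pvBodyB N start elist F v sB x) := by
      rw [List.reverse_append]
      rfl
    have hstack : encPairsL v (q ++ [x]) ++ K
        = (x, v, 1) :: (x, v, 0) :: (encPairsL v q ++ K) := by
      rw [encPairsL_snoc]
      rfl
    by_cases hc : aget sB.ord x = -1
    · -- unvisited target: A activates the pair, B recurses
      have hsim := hIH x v (v :: act) (encPairsL v q ++ K) sA sB h hx.1 hx.2 hc
        (Or.inr ⟨act, rfl⟩) hphi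
      obtain ⟨n1, sA1, hrun1, hinv1, hphi1, hmono1, hordx⟩ := hsim
      have hbody : pvBodyB N start elist F v sB x
          = pvPost N v x (pvDfsB N start elist F x sB) := pvBodyB_unvis N start elist F v sB x hc hvne
      have hphi2 : pvPhi N start (pvBodyB N start elist F v sB x).ord ≤ F := by
        rw [hbody, pvPost_ord]
        omega
      rw [← hbody] at hinv1
      obtain ⟨n2, sA2, hrun2, hinv2, hphiB, hmono2⟩ := ih K sA1 (pvBodyB N start elist F v sB x)
        hinv1 (fun y hy => hp y (by simp [hy])) hphi2
      refine ⟨n2 + n1, sA2, ?_, by rw [hBfold]; exact hinv2, ?_, ?_⟩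
      · rw [hstack, Function.iterate_add_apply, hrun1]
        exact hrun2
      · rw [hBfold]
        have hordeq : (pvBodyB N start elist F v sB x).ord
            = (pvDfsB N start elist F x sB).ord := by rw [hbody, pvPost_ord]
        rw [hordeq] at hphiB
        simp only [List.length_append, List.length_singleton]
        omega
      · rw [hBfold]
        refine pvOrdMono_trans ?_ hmono2
        have hordeq : (pvBodyB N start elist F v sB x).ord
            = (pvDfsB N start elist F x sB).ord := by rw [hbody, pvPost_ord]
        rw [hordeq]
        exact hmono1
    · -- already visited target: one recheck step of A, a single min on B's side
      have hcA : ¬ aget sA.ord x = -1 := by rw [h.ord_eq]; exact hc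
      have hlowv := pv_sync_mem N h (List.mem_cons_self ..)
      have hordx : aget sA.ord x = aget sB.ord x := by rw [h.ord_eq]
      have hbody : pvBodyB N start elist F v sB x
          = { sB with low := aset sB.low v (min (aget sB.low v) (aget sB.ord x)) } :=
        pvBodyB_vis N start elist F v sB x hc
      have hstep : pvStepA N start elist ((x, v, 1) :: (x, v, 0) :: (encPairsL v q ++ K), sA)
          = (encPairsL v q ++ K,
             { sA with low := aset sA.low v (min (aget sA.low v) (aget sA.ord x)) }) := by
        rw [pvStepA_one, if_pos ⟨hvne, hcA⟩]
        rfl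
      have hinv1 : PvInv N (v :: act)
          { sA with low := aset sA.low v (min (aget sA.low v) (aget sA.ord x)) }
          (pvBodyB N start elist F v sB x) := by
        rw [hbody, hlowv, hordx]
        exact pvInv_set_low N h v (List.mem_cons_self ..) _
      have hphi2 : pvPhi N start (pvBodyB N start elist F v sB x).ord ≤ F := by
        rw [hbody]
        exact hphi
      obtain ⟨n2, sA2, hrun2, hinv2, hphiB, hmono2⟩ := ih K _ _ hinv1
        (fun y hy => hp y (by simp [hy])) hphi2
      refine ⟨n2 + 1, sA2, ?_, by rw [hBfold]; exact hinv2, ?_, ?_⟩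
      · rw [hstack, Function.iterate_add_apply, Function.iterate_one, hstep]
        exact hrun2
      · rw [hBfold]
        have : (pvBodyB N start elist F v sB x).ord = sB.ord := by rw [hbody]
        rw [this] at hphiB
        simp only [List.length_append, List.length_singleton]
        omega
      · rw [hBfold]
        refine pvOrdMono_trans ?_ hmono2
        have : (pvBodyB N start elist F v sB x).ord = sB.ord := by rw [hbody]
        rw [this]
        exact pvOrdMono_refl N sB.ord

-- ---------- the main simulation: A's machine vs B's recursion ----------
theorem pvSIM (N : Int) (start elist : List Int)
    (helist : ∀ j : Nat, 0 ≤ elist.getD j 0 ∧ elist.getD j 0 < N) :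
    ∀ fuel : Nat, PvSIMP N start elist fuel := by
  intro fuel
  induction fuel with
  | zero =>
    intro v bef act K sA sB h hv0 hvN hord hbef hphi
    exfalso
    have hvt := (pvIdx_of_range hv0 hvN).2
    have hgd : sB.ord.getD v.toNat 0 = -1 := by
      rw [← pv_aget_toNat sB.ord v hv0]; exact hord
    have := pvPhi_pos N start sB.ord v.toNat hvt hgd
    omega
  | succ F ihF =>
    intro v bef act K sA sB h hv0 hvN hord hbef hphi
    have hN : 0 < N := lt_of_le_of_lt hv0 hvN
    have hvt := (pvIdx_of_range hv0 hvN).2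
    have hordA : aget sA.ord v = -1 := by rw [h.ord_eq]; exact hord
    have hng0 : ¬ sB.ng0 = -1 := by have := h.ng0_nonneg; omega
    obtain ⟨pend, tA, tB, hfA, hfB, hinv1, hrange, hordQ, hpl⟩ :=
      pv_act_inv N start elist helist v act ((v, bef, 0) :: K) sA sB h hv0 hvN hord
    -- Φ drops by 2 + deg(v) at the activation
    have hsetQ : aset sB.ord v sB.ng0 = sB.ord.set v.toNat sB.ng0 :=
      pv_aset_toNat sB.ord v sB.ng0 h.ord_len hv0 hvN
    have hdrop : pvPhi N start (aset sB.ord v sB.ng0) + (2 + pvRangeLen start v.toNat)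
        ≤ pvPhi N start sB.ord := by
      refine pvPhi_drop N start sB.ord _ v.toNat hvt ?_ ?_ ?_
      · rw [← pv_aget_toNat sB.ord v hv0]; exact hord
      · rw [hsetQ, pv_getD_set, if_pos ⟨rfl, by rw [h.ord_len]; exact hvt⟩]
        exact hng0
      · intro j hj
        rw [hsetQ, pv_getD_set, if_neg (fun hh => hj hh.1.symm)]
    have hphiQ : pvPhi N start tB.ord ≤ F := by
      rw [hordQ]
      have := pvPhi_pos N start sB.ord v.toNat hvt
        (by rw [← pv_aget_toNat sB.ord v hv0]; exact hord)
      omega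
    -- the pending loop
    obtain ⟨n2, sA3, hrun2, hinv3, hphi3, hmono3⟩ :=
      pvLOOP N start elist F ihF v act hv0 hvN pend ((v, bef, 0) :: K) tA tB hinv1 hrange hphiQ
    set sBloop := pend.reverse.foldl (pvBodyB N start elist F v) tB with hsBloop
    -- B's recursion computes exactly the composite
    have hdfs : pvDfsB N start elist (F + 1) v sB = pvComp N v sBloop := by
      rw [pvDfsB_succ, hfB]
    -- machine steps
    have e1 : pvStepA N start elist ((v, bef, 1) :: (v, bef, 0) :: K, sA)
        = (encPairsL v pend ++ ((v, bef, 0) :: K), tA) := by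
      rw [pvStepA_one, if_neg (by simp [hordA]), hfA]
    set sA4 : PvSt := { pvComp N v sA3 with low := aset (pvComp N v sA3).low bef (min (aget (pvComp N v sA3).low bef) (aget (pvComp N v sA3).low v)) } with hsA4
    have e3 : pvStepA N start elist ((v, bef, 0) :: K, sA3) = (K, sA4) :=
      pvStepA_zero N start elist v bef K sA3
    have hrun : (pvStepA N start elist)^[n2 + 1 + 1] ((v, bef, 1) :: (v, bef, 0) :: K, sA)
        = (K, sA4) := by
      rw [Function.iterate_succ_apply', Function.iterate_succ_apply, e1, hrun2, e3]
    -- invariant after the component pop and the post write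
    have hinvc : PvInv N (v :: act) (pvComp N v sA3) (pvComp N v sBloop) :=
      pvInv_comp N v hN hinv3 (List.mem_cons_self ..)
    have hlowfinal : PvInv N act sA4 (pvPost N bef v (pvComp N v sBloop)) := by
      rw [hsA4]
      rcases hbef with ⟨hbef1, hact⟩ | ⟨rest, hrest⟩
      · subst hbef1; subst hact
        have hw := pvInv_rootwrite N hN (pvInv_weaken N v hinvc)
          (min (aget (pvComp N v sA3).low (-1)) (aget (pvComp N v sA3).low v))
        unfold pvPost
        rw [if_pos rfl]
        exact hw
      · have hbefmem : bef ∈ v :: act := by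
          rw [hrest]; exact List.mem_cons_of_mem _ (List.mem_cons_self ..)
        have hbef0 : 0 ≤ bef := (hinvc.act_range bef hbefmem).1
        have hbefne : ¬ bef = -1 := by omega
        have hlowb : aget (pvComp N v sA3).low bef = aget (pvComp N v sBloop).low bef := by
          rw [pvComp_low, pvComp_low]; exact pv_sync_mem N hinv3 hbefmem
        have hlowv : aget (pvComp N v sA3).low v = aget (pvComp N v sBloop).low v := by
          rw [pvComp_low, pvComp_low]; exact pv_sync_mem N hinv3 (List.mem_cons_self ..)
        unfold pvPost
        rw [if_neg hbefne, hlowb, hlowv]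
        exact pvInv_weaken N v (pvInv_set_low N hinvc bef hbefmem _)
    -- Φ bookkeeping
    have hphic : pvPhi N start (pvComp N v sBloop).ord ≤ pvPhi N start sBloop.ord :=
      pvPhi_mono N start _ _ (pvComp_mono N v hN sBloop)
    have hphitB : pvPhi N start tB.ord = pvPhi N start (aset sB.ord v sB.ng0) := by rw [hordQ]
    -- ord monotonicity chain
    have hmono0 : pvOrdMono N sB.ord tB.ord := by
      rw [hordQ]
      exact pv_aset_mono_ord N sB.ord v sB.ng0 hng0
    have hmonoc : pvOrdMono N sB.ord (pvComp N v sBloop).ord :=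
      pvOrdMono_trans (pvOrdMono_trans hmono0 hmono3) (pvComp_mono N v hN sBloop)
    have hordvQ : tB.ord.getD v.toNat 0 ≠ -1 := by
      rw [hordQ, hsetQ, pv_getD_set, if_pos ⟨rfl, by rw [h.ord_len]; exact hvt⟩]
      exact hng0
    have hordvfinal : aget (pvComp N v sBloop).ord v ≠ -1 := by
      rw [pv_aget_toNat _ v hv0]
      exact (pvComp_mono N v hN sBloop) v.toNat hvt (hmono3 v.toNat hvt hordvQ)
    refine ⟨n2 + 1 + 1, _, hrun, ?_, ?_, ?_, ?_⟩
    · rw [hdfs]; exact hlowfinal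
    · rw [hdfs]
      omega
    · rw [hdfs]; exact hmonoc
    · rw [hdfs]; exact hordvfinal

-- ---------- outer loop over the vertices ----------
theorem pv_outer (N : Int) (_hN : 0 < N) (start elist : List Int)
    (helist : ∀ j : Nat, 0 ≤ elist.getD j 0 ∧ elist.getD j 0 < N) :
    ∀ (L : List Int) (sA sB : PvSt), (∀ i ∈ L, 0 ≤ i ∧ i < N) → PvInv N [] sA sB →
      PvInv N []
        (L.foldl (fun st i => if aget st.ord i = -1 then pvDfsA N start elist i st else st) sA)
        (L.foldl (fun st i => if aget st.ord i = -1 then pvDfsB N start elist (pvFuelA N start) i st else st) sB) := by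
  intro L
  induction L with
  | nil => intro sA sB _ h; exact h
  | cons i L ih =>
    intro sA sB hmem h
    simp only [List.foldl_cons]
    have hi := hmem i (by simp)
    have hbranch : aget sA.ord i = aget sB.ord i := by rw [h.ord_eq]
    by_cases hord : aget sB.ord i = -1
    · rw [hbranch, if_pos hord, if_pos hord]
      obtain ⟨n, sA2, hrun, hinv, hphi, hmono, hordv⟩ :=
        pvSIM N start elist helist (pvFuelA N start) i (-1) [] [] sA sB h hi.1 hi.2 hord
          (Or.inl ⟨rfl, rfl⟩) (pvPhi_le N start sB.ord)
      have hn : n ≤ pvFuelA N start := le_trans (by omega) (pvPhi_le N start sB.ord)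
      have hdfsA : pvDfsA N start elist i sA = sA2 := by
        unfold pvDfsA
        have hsplit : pvFuelA N start = (pvFuelA N start - n) + n := by omega
        rw [hsplit, Function.iterate_add_apply]
        have : ([(i, -1, 1), (i, -1, 0)] : List (Int × Int × Int))
            = (i, -1, 1) :: (i, -1, 0) :: [] := rfl
        rw [this, hrun, pv_iter_nil]
      have hpost : pvPost N (-1) i (pvDfsB N start elist (pvFuelA N start) i sB)
          = pvDfsB N start elist (pvFuelA N start) i sB := by
        unfold pvPost
        rw [if_pos rfl]
      rw [hdfsA]
      rw [hpost] at hinv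
      exact ih _ _ (fun j hj => hmem j (by simp [hj])) hinv
    · rw [hbranch, if_neg hord, if_neg hord]
      exact ih _ _ (fun j hj => hmem j (by simp [hj])) h

-- ---------- ingredients of the top-level proof ----------
theorem pvRange_nil {a b : Int} (h : b ≤ a) : PySem.List.pyRange a b = [] := by
  refine List.eq_nil_iff_forall_not_mem.mpr (fun x hx => ?_)
  have := PySem.List.mem_pyRange_one.mp hx
  omega

theorem pv_elist_range (N : Int) (hN : 0 < N) (edges : List (List Int)) (start : List Int)
    (hpre : ∀ e ∈ edges, 0 ≤ aget e 1 ∧ aget e 1 < N) :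
    ∀ j : Nat, 0 ≤ (pvElist edges start).getD j 0 ∧ (pvElist edges start).getD j 0 < N := by
  have key : ∀ (L : List (List Int)) (acc : List Int × List Int),
      (∀ e ∈ L, 0 ≤ aget e 1 ∧ aget e 1 < N) →
      (∀ j : Nat, 0 ≤ acc.1.getD j 0 ∧ acc.1.getD j 0 < N) →
      ∀ j : Nat,
        0 ≤ ((L.foldl (fun (p : List Int × List Int) e =>
            (aset p.1 (aget p.2 (aget e 0)) (aget e 1),
             aset p.2 (aget e 0) (aget p.2 (aget e 0) + 1))) acc).1.getD j 0) ∧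
        ((L.foldl (fun (p : List Int × List Int) e =>
            (aset p.1 (aget p.2 (aget e 0)) (aget e 1),
             aset p.2 (aget e 0) (aget p.2 (aget e 0) + 1))) acc).1.getD j 0) < N := by
    intro L
    induction L with
    | nil => intro acc _ hacc j; exact hacc j
    | cons e L ih =>
      intro acc hL hacc j
      simp only [List.foldl_cons]
      refine ih _ (fun e' he' => hL e' (by simp [he'])) ?_ j
      intro j'
      show 0 ≤ (aset acc.1 _ (aget e 1)).getD j' 0 ∧ _
      rw [aset, pv_getD_set]
      split
      · exact hL e (by simp)
      · exact hacc j'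
  intro j
  unfold pvElist
  refine key edges _ hpre ?_ j
  intro j'
  rw [pv_getD_replicate]
  split <;> omega

theorem pvInv_init (N : Int) : PvInv N [] (pvInit N) (pvInit N) := by
  refine ⟨rfl, rfl, rfl, rfl, rfl, by simp [pvInit], by simp [pvInit], by simp [pvInit],
    fun j hj => Or.inl rfl, by simp, by simp, le_refl 0⟩

-- ===== VERDICT (by name: the statement is the Claim_ definition above) =====
theorem edgess_spec : Claim_equal_edgess := by
  intro N edges _hdom hpre
  show edgess N edges = edgess_alt N edges
  obtain ⟨hN0, hedges⟩ := hpre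
  by_cases hN : 0 < N
  · have helist := pv_elist_range N hN edges (pvStart N edges)
      (fun e he => ⟨(hedges e he).2.2.2.1, (hedges e he).2.2.2.2⟩)
    have hmem : ∀ i ∈ PySem.List.pyRange 0 N, 0 ≤ i ∧ i < N := by
      intro i hi
      have := PySem.List.mem_pyRange_one.mp hi
      omega
    have hfin := pv_outer N hN (pvStart N edges) (pvElist edges (pvStart N edges)) helist
      (PySem.List.pyRange 0 N) (pvInit N) (pvInit N) hmem (pvInv_init N)
    simp only [edgess, edgess_alt]
    rw [hfin.ids_eq, hfin.ng1_eq]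
  · have hnil : PySem.List.pyRange 0 N = [] := pvRange_nil (by omega)
    simp only [edgess, edgess_alt, hnil, List.foldl_nil]
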